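-- pv_equiv track=rewrite | github.com/raeez/chiral-bar-cobar | compute/lib/theorem_coha_bar_duality_engine.py | cartan_matrix_from_euler
-- ===== SOURCE A (Python) =====
-- from typing import Dict, List, Optional, Tuple, Union
--
-- def euler_form_ade(dynkin_type: str, rank: int,
--                    d1: List[int], d2: List[int]) -> int:
--     r"""Euler form <d1, d2> for ADE Dynkin quiver.
--
--     <d1, d2> = sum_i d1_i d2_i - sum_{(i->j)} d1_i d2_j
--
--     For ADE types the Euler form is related to the Cartan matrix:
--         <e_i, e_j> = C_{ij}  (Cartan matrix entry)
--     where C = 2I - A (I = identity, A = adjacency of the underlying graph).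
--     """
--     n = rank
--     adj = [[0] * n for _ in range(n)]
--     if dynkin_type == "A":
--         for i in range(n - 1):
--             adj[i][i + 1] = 1
--     elif dynkin_type == "D":
--         for i in range(n - 2):
--             adj[i][i + 1] = 1
--         if n >= 3:
--             adj[n - 3][n - 1] = 1
--     elif dynkin_type == "E":
--         for i in range(n - 2):
--             adj[i][i + 1] = 1
--         adj[2][n - 1] = 1
--
--     result = sum(d1[i] * d2[i] for i in range(n))
--     for i in range(n):
--         for j in range(n):
--             result -= adj[i][j] * d1[i] * d2[j]
--     return result
--
-- def cartan_matrix_from_euler(dynkin_type: str, rank: int) -> List[List[int]]: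
--     r"""Extract the Cartan matrix from the Euler form.
--
--     C_{ij} = <e_i, e_j> + <e_j, e_i>  (symmetrized Euler form)
--
--     For ADE types: C is the standard Cartan matrix with
--     C_{ii} = 2, C_{ij} = -1 if i,j adjacent, 0 otherwise.
--     """
--     n = rank
--     C = [[0] * n for _ in range(n)]
--     for i in range(n):
--         for j in range(n):
--             ei = [0] * n
--             ej = [0] * n
--             ei[i] = 1
--             ej[j] = 1
--             C[i][j] = euler_form_ade(dynkin_type, rank, ei, ej) + \
--                        euler_form_ade(dynkin_type, rank, ej, ei)
--     return C
-- ===== SOURCE B (Python) =====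
-- def cartan_matrix_from_euler(dynkin_type, rank):
--     n = rank
--     if dynkin_type == "A":
--         edges = [(i, i + 1) for i in range(n - 1)]
--     elif dynkin_type == "D":
--         edges = [(i, i + 1) for i in range(n - 2)] + ([(n - 3, n - 1)] if n >= 3 else [])
--     elif dynkin_type == "E":
--         edges = [(i, i + 1) for i in range(n - 2)] + [(2, n - 1)]
--     else:
--         edges = []
--     E = set(edges)
--     return [[2 * (i == j) - ((i, j) in E) - ((j, i) in E) for j in range(n)]
--             for i in range(n)]
-- ===== Notes on version B (the rewrite author's own statement) =====
-- stated objective: faster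
-- what changed: Instead of evaluating the Euler form on all n^2 pairs of basis vectors (each call rebuilding the n x n adjacency matrix and running an n^2 double loop), B builds the Dynkin edge set once and fills C[i][j] = 2*(i==j) - [(i,j) in E] - [(j,i) in E] directly.
import Mathlib
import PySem

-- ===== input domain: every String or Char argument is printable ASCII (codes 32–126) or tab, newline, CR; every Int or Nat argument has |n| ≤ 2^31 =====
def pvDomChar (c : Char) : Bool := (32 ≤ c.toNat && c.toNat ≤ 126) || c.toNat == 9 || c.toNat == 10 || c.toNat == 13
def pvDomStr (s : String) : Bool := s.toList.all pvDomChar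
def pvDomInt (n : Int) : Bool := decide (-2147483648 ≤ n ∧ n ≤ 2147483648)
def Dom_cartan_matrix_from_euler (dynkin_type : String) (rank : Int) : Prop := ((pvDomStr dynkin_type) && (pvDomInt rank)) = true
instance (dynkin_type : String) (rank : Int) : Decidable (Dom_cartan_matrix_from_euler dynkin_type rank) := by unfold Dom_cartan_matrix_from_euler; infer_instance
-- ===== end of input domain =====

-- B replaces A's n^2 Euler-form evaluations on basis vectors (each rebuilding the n×n
-- adjacency matrix) by building the edge list once and filling C[i][j] = 2·[i=j] − [(i,j)∈E] − [(j,i)∈E].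

-- ===== PORT A =====
-- adj[i][j] / C[i][j] write and read on a list-of-lists matrix (the write is a no-op out
-- of range; the one place Python would raise there is excluded by Pre_)
def pvSet2 (m : List (List Int)) (i j : Nat) (v : Int) : List (List Int) :=
  m.set i ((m.getD i []).set j v)

def pvEntry (m : List (List Int)) (i j : Nat) : Int := (m.getD i []).getD j 0

-- the adjacency matrix euler_form_ade builds (its first block, verbatim; n = rank)
def pvAdjA (dynkin_type : String) (N : Nat) : List (List Int) :=
  let z := List.replicate N (List.replicate N (0 : Int))
  if dynkin_type = "A" then
    (List.range (N - 1)).foldl (fun m i => pvSet2 m i (i + 1) 1) z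
  else if dynkin_type = "D" then
    let m := (List.range (N - 2)).foldl (fun m i => pvSet2 m i (i + 1) 1) z
    if 3 ≤ N then pvSet2 m (N - 3) (N - 1) 1 else m
  else if dynkin_type = "E" then
    let m := (List.range (N - 2)).foldl (fun m i => pvSet2 m i (i + 1) 1) z
    -- Python raises IndexError here (adj[2]) when 1 ≤ n ≤ 2; Pre_ excludes those inputs
    pvSet2 m 2 (N - 1) 1
  else z

def euler_form_ade (dynkin_type : String) (rank : Int) (d1 d2 : List Int) : Int :=
  let N := rank.toNat
  let adj := pvAdjA dynkin_type N
  let s := ((List.range N).map (fun k => d1.getD k 0 * d2.getD k 0)).sum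
  (List.range N).foldl
    (fun r i => (List.range N).foldl
      (fun r' j => r' - pvEntry adj i j * d1.getD i 0 * d2.getD j 0) r) s

def cartan_matrix_from_euler (dynkin_type : String) (rank : Int) : List (List Int) :=
  let N := rank.toNat
  (List.range N).foldl
    (fun C i => (List.range N).foldl
      (fun C j =>
        let ei := (List.replicate N (0 : Int)).set i 1
        let ej := (List.replicate N (0 : Int)).set j 1
        pvSet2 C i j (euler_form_ade dynkin_type rank ei ej +
                      euler_form_ade dynkin_type rank ej ei)) C)
    (List.replicate N (List.replicate N (0 : Int)))

-- ===== PORT B =====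
def cartan_matrix_from_euler_alt (dynkin_type : String) (rank : Int) : List (List Int) :=
  let n := rank
  let edges : List (Int × Int) :=
    if dynkin_type = "A" then
      (PySem.List.pyRange 0 (n - 1) 1).map (fun i => (i, i + 1))
    else if dynkin_type = "D" then
      (PySem.List.pyRange 0 (n - 2) 1).map (fun i => (i, i + 1)) ++
        (if 3 ≤ n then [(n - 3, n - 1)] else [])
    else if dynkin_type = "E" then
      (PySem.List.pyRange 0 (n - 2) 1).map (fun i => (i, i + 1)) ++ [(2, n - 1)]
    else []
  let E := PySem.Set.ofList edges
  (PySem.List.pyRange 0 n 1).map (fun i =>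
    (PySem.List.pyRange 0 n 1).map (fun j =>
      (if i = j then 2 else 0) - (if (i, j) ∈ E then 1 else 0) -
        (if (j, i) ∈ E then 1 else 0)))

-- ===== PRECONDITION & SPEC =====
-- Pre_ excludes exactly dynkin_type = "E" with rank ∈ {1, 2}, where A raises IndexError
-- (euler_form_ade writes adj[2][n-1] into a matrix with fewer than 3 rows).
def Pre_cartan_matrix_from_euler (dynkin_type : String) (rank : Int) : Prop :=
  ¬ (dynkin_type = "E" ∧ (rank = 1 ∨ rank = 2))
instance (dynkin_type : String) (rank : Int) : Decidable (Pre_cartan_matrix_from_euler dynkin_type rank) := by unfold Pre_cartan_matrix_from_euler; infer_instance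

def pvWitness_cartan_matrix_from_euler : String × Int := ("D", 4)

def Spec_cartan_matrix_from_euler (dynkin_type : String) (rank : Int) (out : List (List Int)) : Prop := out = cartan_matrix_from_euler_alt dynkin_type rank
instance (dynkin_type : String) (rank : Int) (out : List (List Int)) : Decidable (Spec_cartan_matrix_from_euler dynkin_type rank out) := by unfold Spec_cartan_matrix_from_euler; infer_instance

-- ===== CLAIM (what is proved, stated in full; the proofs are below) =====
def Claim_equal_cartan_matrix_from_euler : Prop := ∀ (dynkin_type : String) (rank : Int), Dom_cartan_matrix_from_euler dynkin_type rank → Pre_cartan_matrix_from_euler dynkin_type rank → Spec_cartan_matrix_from_euler dynkin_type rank (cartan_matrix_from_euler dynkin_type rank)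

-- ===== LEMMAS AND PROOFS =====

def pvShape (m : List (List Int)) (N : Nat) : Prop :=
  m.length = N ∧ ∀ a, a < N → (m.getD a []).length = N

lemma pvShape_zero (N : Nat) : pvShape (List.replicate N (List.replicate N (0 : Int))) N := by
  refine ⟨by simp, fun a ha => ?_⟩
  simp [List.getD, ha]

lemma pvShape_set2 {m : List (List Int)} {N : Nat} (h : pvShape m N) (i j : Nat) (v : Int) :
    pvShape (pvSet2 m i j v) N := by
  obtain ⟨h1, h2⟩ := h
  refine ⟨by simp [pvSet2, h1], fun a ha => ?_⟩
  have hal : a < m.length := h1 ▸ ha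
  have hga := h2 a ha
  simp only [List.getD] at hga ⊢
  by_cases hai : i = a
  · subst hai
    have hga' : m[i].length = N := by simpa [List.getElem?_eq_getElem hal] using hga
    simp [pvSet2, List.getElem?_set, hal, hga']
  · simp [pvSet2, List.getElem?_set, hai, hga]

lemma pvEntry_set2 {m : List (List Int)} {N i j : Nat} (h : pvShape m N)
    (hi : i < N) (hj : j < N) (v : Int) (a b : Nat) :
    pvEntry (pvSet2 m i j v) a b = if a = i ∧ b = j then v else pvEntry m a b := by
  obtain ⟨h1, h2⟩ := h
  have hil : i < m.length := h1 ▸ hi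
  have hrow : (m.getD i []).length = N := h2 i hi
  simp only [pvEntry, pvSet2, List.getD] at *
  by_cases hai : i = a
  · subst hai
    simp only [List.getElem?_set, if_pos rfl, hil, if_pos, Option.getD_some]
    by_cases hbj : j = b
    · subst hbj
      have hjl : j < (m[i]?.getD []).length := by omega
      simp [List.getElem?_set, hjl]
    · simp [List.getElem?_set, hbj, eq_comm]
  · simp [List.getElem?_set, hai, eq_comm]

lemma pvEntry_zero (N a b : Nat) :
    pvEntry (List.replicate N (List.replicate N (0 : Int))) a b = 0 := by
  simp [pvEntry, List.getD, List.getElem?_replicate]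
  split_ifs <;> simp

lemma pvShape_chain {N : Nat} (K : Nat) {m : List (List Int)} (h : pvShape m N) :
    pvShape ((List.range K).foldl (fun m i => pvSet2 m i (i + 1) 1) m) N := by
  induction K with
  | zero => simpa using h
  | succ K ih =>
    rw [List.range_succ, List.foldl_append]
    exact pvShape_set2 ih _ _ _

lemma pvEntry_chain {N : Nat} (K : Nat) (hK : K + 1 ≤ N ∨ K = 0)
    {m : List (List Int)} (h : pvShape m N) (a b : Nat) :
    pvEntry ((List.range K).foldl (fun m i => pvSet2 m i (i + 1) 1) m) a b
      = if b = a + 1 ∧ a < K then 1 else pvEntry m a b := by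
  induction K with
  | zero => simp
  | succ K ih =>
    have hKN : K + 2 ≤ N := by omega
    rw [List.range_succ, List.foldl_append]
    simp only [List.foldl_cons, List.foldl_nil]
    rw [pvEntry_set2 (pvShape_chain K h) (by omega) (by omega)]
    rw [ih (by omega)]
    split_ifs <;> omega

def pvAdjF (dynkin_type : String) (N a b : Nat) : Bool :=
  if dynkin_type = "A" then decide (b = a + 1 ∧ a < N - 1)
  else if dynkin_type = "D" then
    decide ((b = a + 1 ∧ a < N - 2) ∨ (3 ≤ N ∧ a = N - 3 ∧ b = N - 1))
  else if dynkin_type = "E" then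
    decide ((b = a + 1 ∧ a < N - 2) ∨ (3 ≤ N ∧ a = 2 ∧ b = N - 1))
  else false

lemma pvEntry_adjA (t : String) (N : Nat) (hE : t = "E" → N = 0 ∨ 3 ≤ N) (a b : Nat) :
    pvEntry (pvAdjA t N) a b = if pvAdjF t N a b then 1 else 0 := by
  unfold pvAdjA pvAdjF
  simp only [decide_eq_true_eq]
  by_cases hA : t = "A"
  · simp only [hA, String.reduceEq, String.reduceEq, reduceIte]
    rw [pvEntry_chain (N - 1) (by omega) (pvShape_zero N)]
    simp [pvEntry_zero]
  · by_cases hD : t = "D"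
    · simp only [hA, hD, if_neg, if_pos rfl, String.reduceEq, String.reduceEq, reduceIte]
      by_cases h3 : 3 ≤ N
      · simp only [h3, if_pos rfl, String.reduceEq, String.reduceEq, reduceIte]
        rw [pvEntry_set2 (pvShape_chain _ (pvShape_zero N)) (by omega) (by omega)]
        rw [pvEntry_chain (N - 2) (by omega) (pvShape_zero N)]
        simp only [pvEntry_zero]
        simp only [decide_eq_true_eq, true_and, false_and, or_false, false_or]
        all_goals split_ifs <;> omega
      · simp only [h3, String.reduceEq, String.reduceEq, reduceIte]
        rw [pvEntry_chain (N - 2) (by omega) (pvShape_zero N)]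
        simp only [pvEntry_zero]
        simp only [decide_eq_true_eq, true_and, false_and, or_false, false_or]
        all_goals split_ifs <;> omega
    · by_cases hEt : t = "E"
      · simp only [hA, hD, hEt, String.reduceEq, String.reduceEq, reduceIte]
        rcases hE hEt with h0 | h3
        · subst h0
          simp [pvSet2, pvEntry, List.getD]
        · rw [pvEntry_set2 (pvShape_chain _ (pvShape_zero N)) (by omega) (by omega)]
          rw [pvEntry_chain (N - 2) (by omega) (pvShape_zero N)]
          simp only [pvEntry_zero, decide_eq_true_eq]
          split_ifs <;> omega
      · simp only [hA, hD, hEt, String.reduceEq, String.reduceEq, reduceIte]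
        simp [pvEntry_zero]

lemma pvFoldl_sub (f : Nat → Int) : ∀ (L : List Nat) (r : Int),
    L.foldl (fun r x => r - f x) r = r - (L.map f).sum := by
  intro L
  induction L with
  | nil => simp
  | cons x L ih => intro r; simp [ih]; ring

lemma pvFoldl_foldl_sub (g : Nat → Nat → Int) (L2 : List Nat) :
    ∀ (L1 : List Nat) (r : Int),
    L1.foldl (fun r i => L2.foldl (fun r' j => r' - g i j) r) r
      = r - (L1.map (fun i => (L2.map (g i)).sum)).sum := by
  intro L1
  induction L1 with
  | nil => simp
  | cons x L ih => intro r; simp [ih, pvFoldl_sub]; ring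

lemma pvSum_single {N j : Nat} (hj : j < N) (f : Nat → Int)
    (h0 : ∀ l, l < N → l ≠ j → f l = 0) :
    ((List.range N).map f).sum = f j := by
  induction N with
  | zero => omega
  | succ N ih =>
    rw [List.range_succ, List.map_append, List.sum_append]
    by_cases hjN : j = N
    · subst hjN
      have : ((List.range j).map f).sum = 0 := by
        apply List.sum_eq_zero
        intro x hx
        simp only [List.mem_map, List.mem_range] at hx
        obtain ⟨l, hl, rfl⟩ := hx
        exact h0 l (by omega) (by omega)
      simp [this]
    · rw [ih (by omega) (fun l hl hlj => h0 l (by omega) hlj)]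
      simp [h0 N (by omega) (Ne.symm hjN)]

lemma pvBasis_getD {N i : Nat} (hi : i < N) (k : Nat) :
    ((List.replicate N (0 : Int)).set i 1).getD k 0 = if k = i then 1 else 0 := by
  by_cases hik : i = k
  · subst hik; simp [List.getD, List.getElem?_set, hi]
  · by_cases hk : k < N
    · simp [List.getD, List.getElem?_set, hik, hk, eq_comm]
    · have : ((List.replicate N (0:Int)).set i 1)[k]? = none := by
        apply List.getElem?_eq_none; simpa using hk
      simp [List.getD, this]
      omega

lemma pvEuler_basis (t : String) (rank : Int) {i j : Nat}
    (hi : i < rank.toNat) (hj : j < rank.toNat) :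
    euler_form_ade t rank ((List.replicate rank.toNat (0 : Int)).set i 1)
        ((List.replicate rank.toNat (0 : Int)).set j 1)
      = (if i = j then 1 else 0) - pvEntry (pvAdjA t rank.toNat) i j := by
  set N := rank.toNat with hN
  unfold euler_form_ade
  rw [pvFoldl_foldl_sub]
  have h1 : ∀ k : Nat, ((List.replicate N (0:Int)).set i 1).getD k 0 *
      ((List.replicate N (0:Int)).set j 1).getD k 0
      = if k = i then (if i = j then 1 else 0) else 0 := by
    intro k
    simp only [pvBasis_getD hi, pvBasis_getD hj]
    split_ifs <;> simp_all
  have hs : ((List.range N).map (fun k =>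
      ((List.replicate N (0:Int)).set i 1).getD k 0 *
      ((List.replicate N (0:Int)).set j 1).getD k 0)).sum = if i = j then 1 else 0 := by
    calc ((List.range N).map (fun k =>
        ((List.replicate N (0:Int)).set i 1).getD k 0 *
        ((List.replicate N (0:Int)).set j 1).getD k 0)).sum
        = ((List.range N).map (fun k => if k = i then (if i = j then (1:Int) else 0) else 0)).sum :=
          congrArg List.sum (List.map_congr_left (fun k _ => h1 k))
      _ = if i = j then 1 else 0 := by
          rw [pvSum_single hi _ (fun l _ hli => by simp [hli])]; simp
  rw [hs]
  have hinner : ∀ a : Nat, ((List.range N).map (fun b => pvEntry (pvAdjA t N) a b *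
      ((List.replicate N (0:Int)).set i 1).getD a 0 *
      ((List.replicate N (0:Int)).set j 1).getD b 0)).sum
      = if a = i then pvEntry (pvAdjA t N) a j else 0 := by
    intro a
    have h2 : ∀ b : Nat, pvEntry (pvAdjA t N) a b *
        ((List.replicate N (0:Int)).set i 1).getD a 0 *
        ((List.replicate N (0:Int)).set j 1).getD b 0
        = if b = j then (if a = i then pvEntry (pvAdjA t N) a j else 0) else 0 := by
      intro b
      simp only [pvBasis_getD hi, pvBasis_getD hj]
      split_ifs <;> simp_all <;> ring
    calc ((List.range N).map (fun b => pvEntry (pvAdjA t N) a b *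
        ((List.replicate N (0:Int)).set i 1).getD a 0 *
        ((List.replicate N (0:Int)).set j 1).getD b 0)).sum
        = ((List.range N).map (fun b => if b = j then (if a = i then pvEntry (pvAdjA t N) a j else 0) else 0)).sum :=
          congrArg List.sum (List.map_congr_left (fun b _ => h2 b))
      _ = if a = i then pvEntry (pvAdjA t N) a j else 0 := by
          rw [pvSum_single hj _ (fun l _ hlj => by simp [hlj])]; simp
  have houter : ((List.range N).map (fun a =>
      ((List.range N).map (fun b => pvEntry (pvAdjA t N) a b *
        ((List.replicate N (0:Int)).set i 1).getD a 0 *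
        ((List.replicate N (0:Int)).set j 1).getD b 0)).sum)).sum
      = pvEntry (pvAdjA t N) i j := by
    calc ((List.range N).map (fun a =>
        ((List.range N).map (fun b => pvEntry (pvAdjA t N) a b *
          ((List.replicate N (0:Int)).set i 1).getD a 0 *
          ((List.replicate N (0:Int)).set j 1).getD b 0)).sum)).sum
        = ((List.range N).map (fun a => if a = i then pvEntry (pvAdjA t N) a j else 0)).sum :=
          congrArg List.sum (List.map_congr_left (fun a _ => hinner a))
      _ = pvEntry (pvAdjA t N) i j := by
          rw [pvSum_single hi _ (fun l _ hli => by simp [hli])]; simp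
  rw [houter]

lemma pvShape_fill_inner {N i : Nat} (val : Nat → Nat → Int) (K : Nat)
    {m : List (List Int)} (h : pvShape m N) :
    pvShape ((List.range K).foldl (fun C j => pvSet2 C i j (val i j)) m) N := by
  induction K with
  | zero => simpa using h
  | succ K ih =>
    rw [List.range_succ, List.foldl_append]
    exact pvShape_set2 ih _ _ _

lemma pvEntry_fill_inner {N i : Nat} (hi : i < N) (val : Nat → Nat → Int)
    (K : Nat) (hK : K ≤ N) {m : List (List Int)} (h : pvShape m N) (a b : Nat) :
    pvEntry ((List.range K).foldl (fun C j => pvSet2 C i j (val i j)) m) a b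
      = if a = i ∧ b < K then val i b else pvEntry m a b := by
  induction K with
  | zero => simp
  | succ K ih =>
    rw [List.range_succ, List.foldl_append]
    simp only [List.foldl_cons, List.foldl_nil]
    rw [pvEntry_set2 (pvShape_fill_inner val K h) hi (by omega)]
    rw [ih (by omega)]
    split_ifs <;> first | rfl | omega | (simp_all <;> omega)

lemma pvShape_fill {N : Nat} (val : Nat → Nat → Int) (K : Nat)
    {m : List (List Int)} (h : pvShape m N) :
    pvShape ((List.range K).foldl
        (fun C i => (List.range N).foldl (fun C j => pvSet2 C i j (val i j)) C) m) N := by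
  induction K with
  | zero => simpa using h
  | succ K ih =>
    rw [List.range_succ, List.foldl_append]
    simp only [List.foldl_cons, List.foldl_nil]
    exact pvShape_fill_inner val N ih

lemma pvEntry_fill {N : Nat} (val : Nat → Nat → Int) (K : Nat) (hK : K ≤ N)
    {m : List (List Int)} (h : pvShape m N) (a b : Nat) :
    pvEntry ((List.range K).foldl
        (fun C i => (List.range N).foldl (fun C j => pvSet2 C i j (val i j)) C) m) a b
      = if a < K ∧ b < N then val a b else pvEntry m a b := by
  induction K with
  | zero => simp
  | succ K ih =>
    rw [List.range_succ, List.foldl_append]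
    simp only [List.foldl_cons, List.foldl_nil]
    rw [pvEntry_fill_inner (by omega) val N (by omega) (pvShape_fill val K h)]
    rw [ih (by omega)]
    split_ifs <;> first | rfl | omega | (simp_all <;> omega)

lemma pvEdges_mem (t : String) (rank : Int) (hr : 0 ≤ rank)
    (hE : t = "E" → rank.toNat = 0 ∨ 3 ≤ rank.toNat) {a b : Nat}
    (ha : a < rank.toNat) (hb : b < rank.toNat) :
    (((a : Int), (b : Int)) ∈ PySem.Set.ofList
      (if t = "A" then
        (PySem.List.pyRange 0 (rank - 1) 1).map (fun i => (i, i + 1))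
      else if t = "D" then
        (PySem.List.pyRange 0 (rank - 2) 1).map (fun i => (i, i + 1)) ++
          (if 3 ≤ rank then [(rank - 3, rank - 1)] else [])
      else if t = "E" then
        (PySem.List.pyRange 0 (rank - 2) 1).map (fun i => (i, i + 1)) ++ [(2, rank - 1)]
      else []))
    ↔ pvAdjF t rank.toNat a b = true := by
  rw [PySem.Set.mem_ofList]
  unfold pvAdjF
  by_cases hA : t = "A"
  · simp only [hA, String.reduceEq, reduceIte, decide_eq_true_eq, List.mem_map,
      PySem.List.mem_pyRange_one, Prod.mk.injEq]
    constructor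
    · rintro ⟨x, ⟨hx0, hx1⟩, hxa, hxb⟩
      omega
    · rintro ⟨hb', hlt⟩
      exact ⟨(a : Int), ⟨by omega, by omega⟩, rfl, by omega⟩
  · by_cases hD : t = "D"
    · simp only [hA, hD, String.reduceEq, reduceIte, decide_eq_true_eq, List.mem_append, List.mem_map,
        PySem.List.mem_pyRange_one, Prod.mk.injEq]
      by_cases h3 : 3 ≤ rank
      · simp only [h3, reduceIte, List.mem_singleton, Prod.mk.injEq]
        constructor
        · rintro (⟨x, ⟨hx0, hx1⟩, hxa, hxb⟩ | ⟨hxa, hxb⟩)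
          · left; omega
          · right; omega
        · rintro (⟨hb', hlt⟩ | ⟨h3', ha', hb'⟩)
          · left; exact ⟨(a : Int), ⟨by omega, by omega⟩, rfl, by omega⟩
          · right; omega
      · simp only [h3, reduceIte, List.not_mem_nil, or_false]
        constructor
        · rintro ⟨x, ⟨hx0, hx1⟩, hxa, hxb⟩
          left; omega
        · rintro (⟨hb', hlt⟩ | ⟨h3', ha', hb'⟩)
          · exact ⟨(a : Int), ⟨by omega, by omega⟩, rfl, by omega⟩
          · omega
    · by_cases hEt : t = "E"
      · simp only [hA, hD, hEt, String.reduceEq, reduceIte, decide_eq_true_eq, List.mem_append, List.mem_map,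
          PySem.List.mem_pyRange_one, List.mem_singleton, Prod.mk.injEq]
        rcases hE hEt with h0 | h3
        · omega
        · constructor
          · rintro (⟨x, ⟨hx0, hx1⟩, hxa, hxb⟩ | ⟨hxa, hxb⟩)
            · left; omega
            · right; omega
          · rintro (⟨hb', hlt⟩ | ⟨h3', ha', hb'⟩)
            · left; exact ⟨(a : Int), ⟨by omega, by omega⟩, rfl, by omega⟩
            · right; omega
      · simp [hA, hD, hEt]

def pvVal (t : String) (rank : Int) (N : Nat) (i j : Nat) : Int :=
  euler_form_ade t rank ((List.replicate N (0 : Int)).set i 1)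
      ((List.replicate N (0 : Int)).set j 1) +
  euler_form_ade t rank ((List.replicate N (0 : Int)).set j 1)
      ((List.replicate N (0 : Int)).set i 1)

lemma pvEntry_get {m : List (List Int)} {i j : Nat} (hi' : i < m.length)
    (hj' : j < (m[i]).length) : m[i][j] = pvEntry m i j := by
  unfold pvEntry
  rw [List.getD_eq_getElem _ _ hi', List.getD_eq_getElem _ _ hj']

lemma pvMain (t : String) (rank : Int)
    (hpre : ¬ (t = "E" ∧ (rank = 1 ∨ rank = 2))) :
    cartan_matrix_from_euler t rank = cartan_matrix_from_euler_alt t rank := by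
  by_cases hr : 0 < rank
  case neg =>
    have h0 : rank.toNat = 0 := by omega
    unfold cartan_matrix_from_euler cartan_matrix_from_euler_alt
    simp [h0, PySem.List.pyRange_one_eq_nil (by omega : rank ≤ 0)]
  case pos =>
  have hr0 : 0 ≤ rank := le_of_lt hr
  unfold cartan_matrix_from_euler cartan_matrix_from_euler_alt
  simp only []
  set N := rank.toNat with hNdef
  have hNr : (N : Int) = rank := Int.toNat_of_nonneg hr0
  have hE : t = "E" → N = 0 ∨ 3 ≤ N := by
    intro hEt
    have : rank ≠ 1 ∧ rank ≠ 2 := by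
      constructor <;> intro h <;> exact hpre ⟨hEt, by omega⟩
    omega
  have hrange : PySem.List.pyRange 0 rank 1 = (List.range N).map (fun k : Nat => ((k : Int))) := by
    rw [PySem.List.pyRange_one]
    have hN0 : (rank - 0).toNat = N := by omega
    rw [hN0]
    apply List.map_congr_left
    intro k _
    simp
  rw [hrange]
  have hfoldeq : ((List.range N).foldl
      (fun C i => (List.range N).foldl
        (fun C j => pvSet2 C i j
          (euler_form_ade t rank ((List.replicate N (0 : Int)).set i 1)
              ((List.replicate N (0 : Int)).set j 1) +
            euler_form_ade t rank ((List.replicate N (0 : Int)).set j 1)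
              ((List.replicate N (0 : Int)).set i 1))) C)
      (List.replicate N (List.replicate N (0 : Int))))
      = ((List.range N).foldl
      (fun C i => (List.range N).foldl (fun C j => pvSet2 C i j (pvVal t rank N i j)) C)
      (List.replicate N (List.replicate N (0 : Int)))) := rfl
  rw [hfoldeq]
  have hshape : pvShape ((List.range N).foldl
      (fun C i => (List.range N).foldl (fun C j => pvSet2 C i j (pvVal t rank N i j)) C)
      (List.replicate N (List.replicate N (0 : Int)))) N :=
    pvShape_fill (pvVal t rank N) N (pvShape_zero N)
  apply List.ext_getElem
  · simp [hshape.1]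
  intro i hi hi'
  have hiN : i < N := by
    have := hshape.1
    omega
  simp only [List.getElem_map, List.getElem_range]
  apply List.ext_getElem
  · have h2 := hshape.2 i hiN
    rw [List.getD_eq_getElem _ _ hi] at h2
    simp [h2]
  intro j hj hj'
  have hjN : j < N := by
    have h2 := hshape.2 i hiN
    rw [List.getD_eq_getElem _ _ hi] at h2
    omega
  simp only [List.getElem_map, List.getElem_range]
  rw [pvEntry_get hi hj]
  rw [pvEntry_fill (pvVal t rank N) N le_rfl (pvShape_zero N)]
  rw [if_pos ⟨hiN, hjN⟩]
  have hmemij := pvEdges_mem t rank hr0 hE hiN hjN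
  have hmemji := pvEdges_mem t rank hr0 hE hjN hiN
  unfold pvVal
  rw [pvEuler_basis t rank hiN hjN, pvEuler_basis t rank hjN hiN]
  rw [pvEntry_adjA t N hE i j, pvEntry_adjA t N hE j i]
  simp only [hmemij, hmemji, Int.natCast_inj]
  split_ifs <;> omega

-- ===== VERDICT (by name: the statement is the Claim_ definition above) =====
theorem cartan_matrix_from_euler_spec : Claim_equal_cartan_matrix_from_euler := by
  intro t rank _ hpre
  unfold Spec_cartan_matrix_from_euler
  exact (pvMain t rank hpre).symm ▸ rfl
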